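-- pv_equiv track=rewrite | github.com/tl-ecosystem/tlang | interpreter/handlers/tools.py | formating_line
-- ===== SOURCE A (Python) =====
-- def formating_line( line: str) -> str: # easily can be simpler
--     '''
--     Formats the line for the easier readibility of other built-in functions (it basically clears any whitespace)
--     '''
--     # Will take a line and,
--     #   clear every space it has, if there is a string it will ignore the spaces inside of it
--     #   return the line as a whole
--     #   use cases: easier to detect the logical operations in the brackets and fixes white space at the start of the line
--     n_line = ''
--     index = 0
--     while index != len(line): # a controlable for loop as a while loop
--         if line[index] == '"': # char = line[index]
--             if line.find('"',index+1) != -1: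
--                 detected_str = line[index: line.find('"',index+1)]
--                 n_line += detected_str
--                 index += len(detected_str)
--             else:
--                 n_line += line[index]
--                 index += 1
--         elif line[index] != ' ':
--             n_line += line[index]
--             index += 1
--         else:
--             index += 1
--     return n_line[:len(n_line)-1] if n_line.endswith('\n') else n_line # just in case it's the last line or not
-- ===== SOURCE B (Python) =====
-- def formating_line(line: str) -> str:
--     '''
--     Formats the line for the easier readibility of other built-in functions (it basically clears any whitespace)
--     '''
--     # Everything between the first and the last '"' (inclusive) is preserved verbatim;
--     # spaces are removed only before the first quote and after the last one.
--     first = line.find('"')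
--     last = line.rfind('"')
--     if first == -1:
--         result = line.replace(' ', '')
--     else:
--         result = line[:first].replace(' ', '') + line[first:last + 1] + line[last + 1:].replace(' ', '')
--     return result[:-1] if result.endswith('\n') else result
-- ===== Notes on version B (the rewrite author's own statement) =====
-- stated objective: simpler
-- what changed: Replaces the char-by-char while loop with find-and-jump over quote pairs by boundary detection (first/last quote via find/rfind) plus three slices: strip spaces before the first quote and after the last, keep the span between them verbatim.
import Mathlib
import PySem

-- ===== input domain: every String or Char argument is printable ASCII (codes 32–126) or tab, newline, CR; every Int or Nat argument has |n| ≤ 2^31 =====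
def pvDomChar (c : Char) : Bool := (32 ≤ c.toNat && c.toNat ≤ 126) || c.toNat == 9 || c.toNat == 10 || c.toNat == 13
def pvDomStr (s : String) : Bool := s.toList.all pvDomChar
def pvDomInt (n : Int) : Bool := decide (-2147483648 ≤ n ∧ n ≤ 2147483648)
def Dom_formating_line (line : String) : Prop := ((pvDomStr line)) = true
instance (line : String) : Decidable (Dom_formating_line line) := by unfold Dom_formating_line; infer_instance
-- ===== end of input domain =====

-- B replaces A's char-by-char find-and-jump loop with boundary detection (first/last quote via
-- find/rfind) plus three slices, stripping spaces only outside the first-to-last-quote span;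
-- objective: simpler.

-- ===== PORT A =====
-- A's while loop, ported as structural recursion on the unprocessed suffix: at position `index`
-- the loop only ever reads `line[index:]`, and `line.find('"', index+1)` equals
-- `index + 1 + rest.find('"')` on the suffix `rest = line[index+1:]` (exact: the detected span
-- `line[index : line.find('"', index+1)]` is `c :: rest.take f.toNat`, and the new index lands
-- on the found quote, i.e. on the suffix `rest.drop f.toNat`).
def formatingLoopA (cs : List Char) : List Char :=
  match cs with
  | [] => []
  | c :: rest =>
    if c = '"' then
      if PySem.Chars.find rest ['"'] ≠ -1 then
        -- detected_str = line[index : line.find('"', index+1)]; index += len(detected_str)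
        (c :: rest.take (PySem.Chars.find rest ['"']).toNat) ++
          formatingLoopA (rest.drop (PySem.Chars.find rest ['"']).toNat)
      else
        c :: formatingLoopA rest
    else if c ≠ ' ' then
      c :: formatingLoopA rest
    else
      formatingLoopA rest
termination_by cs.length
decreasing_by all_goals simp

-- return n_line[:len(n_line)-1] if n_line.endswith('\n') else n_line
-- ([:len(n_line)-1] = dropLast; exact here, the guard forces n_line nonempty)
def formating_line (line : String) : String :=
  let nline := formatingLoopA line.toList
  String.ofList (if PySem.Chars.endswith nline ['\n'] then nline.dropLast else nline)

-- ===== PORT B =====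
-- line[:first] / line[first:last+1] / line[last+1:] with 0 ≤ first ≤ last: these slices are
-- exactly take/drop on the character list.
def formating_line_alt (line : String) : String :=
  let cs := line.toList
  let first := PySem.Chars.find cs ['"']
  let last := PySem.Chars.rfind cs ['"']
  let result :=
    if first = -1 then
      PySem.Chars.replace cs [' '] []
    else
      PySem.Chars.replace (cs.take first.toNat) [' '] [] ++
        ((cs.take (last.toNat + 1)).drop first.toNat) ++
        PySem.Chars.replace (cs.drop (last.toNat + 1)) [' '] []
  String.ofList (if PySem.Chars.endswith result ['\n'] then result.dropLast else result)

-- ===== PRECONDITION & SPEC =====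
def Spec_formating_line (line : String) (out : String) : Prop := out = formating_line_alt line
instance (line : String) (out : String) : Decidable (Spec_formating_line line out) := by unfold Spec_formating_line; infer_instance

-- ===== CLAIM (what is proved, stated in full; the proofs are below) =====
def Claim_equal_formating_line : Prop := ∀ (line : String), Dom_formating_line line → Spec_formating_line line (formating_line line)

-- ===== LEMMAS AND PROOFS =====

-- a singleton pattern is a prefix exactly of lists starting with it
theorem singleton_prefix_iff (a : Char) (l : List Char) : [a] <+: l ↔ ∃ t, l = a :: t := by
  constructor
  · rintro ⟨t, rfl⟩; exact ⟨t, rfl⟩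
  · rintro ⟨t, rfl⟩; exact ⟨t, rfl⟩

-- find on a singleton pattern: -1 exactly when the character is absent
theorem find_singleton_eq_neg_one (a : Char) (l : List Char) (h : a ∉ l) :
    PySem.Chars.find l [a] = -1 := by
  rw [PySem.Chars.find_eq_neg_one_iff, List.singleton_infix_iff]
  exact h

-- find on a singleton pattern points at the first occurrence
theorem find_singleton_first (a : Char) (pre suf : List Char) (h : a ∉ pre) :
    PySem.Chars.find (pre ++ a :: suf) [a] = (pre.length : Int) := by
  have hmem : a ∈ pre ++ a :: suf := by simp
  have hnn : 0 ≤ PySem.Chars.find (pre ++ a :: suf) [a] := by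
    rw [PySem.Chars.find_nonneg_iff, List.singleton_infix_iff]; exact hmem
  obtain ⟨hpref, hmin⟩ := PySem.Chars.find_spec hnn
  set n := (PySem.Chars.find (pre ++ a :: suf) [a]).toNat with hn
  have hle : pre.length ≤ n := by
    rcases Nat.lt_or_ge n pre.length with hlt | hge
    · exfalso
      obtain ⟨t, ht⟩ := (singleton_prefix_iff _ _).1 hpref
      have hnlen : n < (pre ++ a :: suf).length := by
        simp only [List.length_append, List.length_cons]; omega
      rw [List.drop_eq_getElem_cons hnlen] at ht
      injection ht with h1 _
      have hpe : (pre ++ a :: suf)[n]'hnlen = pre[n]'hlt := List.getElem_append_left hlt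
      have hin : pre[n]'hlt = a := by rw [← hpe, h1]
      exact h (hin ▸ List.getElem_mem hlt)
    · exact hge
  have hge : ¬ (pre.length < n) := by
    intro hlt
    apply hmin pre.length hlt
    rw [List.drop_left, singleton_prefix_iff]
    exact ⟨suf, rfl⟩
  have : n = pre.length := by omega
  omega

-- rfind.go on a singleton pattern, scanned down from any j ≥ the last occurrence
theorem rfind_go_singleton (a : Char) (pre suf : List Char) (h : a ∉ suf) :
    ∀ j : Nat, pre.length ≤ j →
      PySem.Chars.rfind.go (pre ++ a :: suf) [a] j = (pre.length : Int) := by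
  intro j
  induction j with
  | zero =>
    intro hj
    have hp0 : pre = [] := by
      cases pre with
      | nil => rfl
      | cons x xs => simp at hj
    subst hp0
    have hb : [a].isPrefixOf (([] : List Char) ++ a :: suf) = true := by
      rw [List.isPrefixOf_iff_prefix]; exact ⟨suf, rfl⟩
    simp only [PySem.Chars.rfind.go]
    rw [if_pos hb]
    simp
  | succ k ih =>
    intro hj
    rcases Nat.lt_or_ge k pre.length with hk | hk
    · -- k + 1 = pre.length: the quote is right here
      have hkk : k + 1 = pre.length := by omega
      have hb : [a].isPrefixOf ((pre ++ a :: suf).drop (k + 1)) = true := by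
        rw [List.isPrefixOf_iff_prefix, hkk, List.drop_left]; exact ⟨suf, rfl⟩
      simp only [PySem.Chars.rfind.go]
      rw [if_pos hb]
      simp [hkk]
    · -- k + 1 > pre.length: no quote at position k+1 (it lies inside suf)
      have hnp : ¬ ([a] <+: (pre ++ a :: suf).drop (k + 1)) := by
        intro hp
        obtain ⟨t, ht⟩ := hp
        have hmem : a ∈ (pre ++ a :: suf).drop (k + 1) := by rw [← ht]; simp
        have h2 : (pre ++ a :: suf).drop (k + 1) ⊆ (pre ++ a :: suf).drop (pre.length + 1) :=
          List.drop_subset_drop_left _ (by omega)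
        have h3 : (pre ++ a :: suf).drop (pre.length + 1) = suf := by
          have h1 : pre ++ a :: suf = (pre ++ [a]) ++ suf := by simp
          have h4 : pre.length + 1 = (pre ++ [a]).length := by simp
          rw [h1, h4, List.drop_left]
        exact h (h3 ▸ h2 hmem)
      have hb : ¬ ([a].isPrefixOf ((pre ++ a :: suf).drop (k + 1)) = true) := by
        rw [List.isPrefixOf_iff_prefix]; exact hnp
      simp only [PySem.Chars.rfind.go]
      rw [if_neg hb]
      exact ih hk

-- rfind on a singleton pattern points at the last occurrence
theorem rfind_singleton_last (a : Char) (pre suf : List Char) (h : a ∉ suf) :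
    PySem.Chars.rfind (pre ++ a :: suf) [a] = (pre.length : Int) := by
  unfold PySem.Chars.rfind
  exact rfind_go_singleton a pre suf h _
    (by simp only [List.length_append, List.length_cons]; omega)

-- str.replace(' ', '') removes exactly the spaces
theorem replace_go_space (fuel : Nat) :
    ∀ (l acc : List Char), l.length ≤ fuel →
      PySem.Chars.replace.go [' '] [] fuel l acc =
        acc.reverse ++ l.filter (fun c => !(c == ' ')) := by
  induction fuel with
  | zero =>
    intro l acc hl
    have : l = [] := by cases l <;> simp_all
    subst this
    simp [PySem.Chars.replace.go]
  | succ k ih =>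
    intro l acc hl
    cases l with
    | nil => simp [PySem.Chars.replace.go]
    | cons c t =>
      simp only [PySem.Chars.replace.go]
      by_cases hc : c = ' '
      · subst hc
        rw [if_pos (by rw [List.isPrefixOf_iff_prefix, singleton_prefix_iff]; exact ⟨t, rfl⟩)]
        simp only [List.length_cons] at hl
        rw [ih _ _ (by simpa using Nat.le_of_succ_le_succ hl)]
        simp
      · rw [if_neg (by
          rw [List.isPrefixOf_iff_prefix, singleton_prefix_iff]
          rintro ⟨u, hu⟩
          injection hu with h1 _
          exact hc h1)]
        simp only [List.length_cons] at hl
        rw [ih _ _ (Nat.le_of_succ_le_succ hl)]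
        simp [hc]

theorem replace_space_eq_filter (l : List Char) :
    PySem.Chars.replace l [' '] [] = l.filter (fun c => !(c == ' ')) := by
  unfold PySem.Chars.replace
  rw [if_neg (by simp)]
  simpa using replace_go_space l.length l [] (le_refl _)

-- A's loop over a quote-free prefix just filters out its spaces
theorem formatingLoopA_no_quote (a rest : List Char) (h : '"' ∉ a) :
    formatingLoopA (a ++ rest) = a.filter (fun c => !(c == ' ')) ++ formatingLoopA rest := by
  induction a with
  | nil => simp
  | cons c t ih =>
    have hc : c ≠ '"' := fun hc => h (hc ▸ List.mem_cons_self)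
    have ht : '"' ∉ t := fun hm => h (List.mem_cons_of_mem _ hm)
    rw [List.cons_append, formatingLoopA]
    by_cases hsp : c = ' '
    · subst hsp
      rw [if_neg (by simp [hc]), if_neg (by simp)]
      simp [ih ht]
    · rw [if_neg hc, if_pos hsp]
      simp [ih ht, hsp]

-- one character in a quote-free list: splitting off the first occurrence / last occurrence
theorem exists_first_split (a : Char) (l : List Char) (h : a ∈ l) :
    ∃ s t, l = s ++ a :: t ∧ a ∉ s := by
  induction l with
  | nil => cases h
  | cons c r ih =>
    by_cases hc : c = a
    · exact ⟨[], r, by simp [hc], by simp⟩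
    · obtain ⟨s, t, rfl, hs⟩ := ih (by cases h with
        | head => exact absurd rfl hc
        | tail _ hm => exact hm)
      exact ⟨c :: s, t, rfl, by
        simp only [List.mem_cons, not_or]
        exact ⟨fun h' => hc h'.symm, hs⟩⟩

theorem exists_last_split (a : Char) (l : List Char) (h : a ∈ l) :
    ∃ s t, l = s ++ a :: t ∧ a ∉ t := by
  obtain ⟨s, t, hl, hs⟩ := exists_first_split a l.reverse (by simpa using h)
  refine ⟨t.reverse, s.reverse, ?_, by simpa using hs⟩
  have := congrArg List.reverse hl
  simpa using this

-- A's loop, standing on a quote whose closing partner has no further quote behind it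
theorem formatingLoopA_quote_noclose (b : List Char) (hb : '"' ∉ b) :
    formatingLoopA ('"' :: b) = '"' :: b.filter (fun c => !(c == ' ')) := by
  rw [formatingLoopA, if_pos rfl,
    if_neg (by rw [find_singleton_eq_neg_one '"' b hb]; simp)]
  have := formatingLoopA_no_quote b [] hb
  simp only [List.append_nil] at this
  rw [this]
  simp [formatingLoopA]

-- one find-and-jump step of A's loop, from a quote to the next one
theorem formatingLoopA_quote_step (mid rest : List Char) (hmid : '"' ∉ mid) :
    formatingLoopA ('"' :: (mid ++ '"' :: rest)) =
      '"' :: mid ++ formatingLoopA ('"' :: rest) := by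
  have hfind : PySem.Chars.find (mid ++ '"' :: rest) ['"'] = (mid.length : Int) :=
    find_singleton_first '"' mid rest hmid
  rw [formatingLoopA, if_pos rfl, if_pos (by rw [hfind]; omega), hfind]
  simp only [Int.toNat_natCast, List.take_left, List.drop_left]

-- A's loop keeps the whole first-to-last-quote span verbatim, then filters the remainder
theorem formatingLoopA_span_aux (n : Nat) :
    ∀ mid suf : List Char, mid.length ≤ n → '"' ∉ suf →
      formatingLoopA ('"' :: (mid ++ '"' :: suf)) =
        '"' :: mid ++ '"' :: suf.filter (fun c => !(c == ' ')) := by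
  induction n with
  | zero =>
    intro mid suf hlen hsuf
    have : mid = [] := by cases mid <;> simp_all
    subst this
    rw [formatingLoopA_quote_step [] suf (by simp), formatingLoopA_quote_noclose suf hsuf]
  | succ k ih =>
    intro mid suf hlen hsuf
    by_cases hmid : '"' ∈ mid
    · obtain ⟨m1, m2, rfl, hm1⟩ := exists_first_split '"' mid hmid
      have hre : (m1 ++ '"' :: m2) ++ '"' :: suf = m1 ++ '"' :: (m2 ++ '"' :: suf) := by simp
      rw [hre, formatingLoopA_quote_step m1 (m2 ++ '"' :: suf) hm1,
        ih m2 suf (by simp at hlen; omega) hsuf]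
      simp
    · rw [formatingLoopA_quote_step mid suf hmid, formatingLoopA_quote_noclose suf hsuf]

theorem formatingLoopA_span (mid suf : List Char) (h : '"' ∉ suf) :
    formatingLoopA ('"' :: (mid ++ '"' :: suf)) =
      '"' :: mid ++ '"' :: suf.filter (fun c => !(c == ' ')) :=
  formatingLoopA_span_aux mid.length mid suf (le_refl _) h

-- the bodies handed to the common trailing-newline trim agree
theorem core_eq (cs : List Char) :
    formatingLoopA cs =
      (if PySem.Chars.find cs ['"'] = -1 then
        PySem.Chars.replace cs [' '] []
      else
        PySem.Chars.replace (cs.take (PySem.Chars.find cs ['"']).toNat) [' '] [] ++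
          ((cs.take ((PySem.Chars.rfind cs ['"']).toNat + 1)).drop
            (PySem.Chars.find cs ['"']).toNat) ++
          PySem.Chars.replace (cs.drop ((PySem.Chars.rfind cs ['"']).toNat + 1)) [' '] []) := by
  by_cases hq : '"' ∈ cs
  · obtain ⟨a, b, rfl, ha⟩ := exists_first_split '"' cs hq
    have hfind : PySem.Chars.find (a ++ '"' :: b) ['"'] = (a.length : Int) :=
      find_singleton_first '"' a b ha
    rw [if_neg (by rw [hfind]; omega), hfind]
    simp only [Int.toNat_natCast]
    by_cases hb : '"' ∈ b
    · obtain ⟨m, z, rfl, hz⟩ := exists_last_split '"' b hb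
      have hrf : PySem.Chars.rfind (a ++ '"' :: (m ++ '"' :: z)) ['"']
          = ((a ++ '"' :: m).length : Int) := by
        have : a ++ '"' :: (m ++ '"' :: z) = (a ++ '"' :: m) ++ '"' :: z := by simp
        rw [this]
        exact rfind_singleton_last '"' (a ++ '"' :: m) z hz
      rw [hrf]
      simp only [Int.toNat_natCast]
      have hA : formatingLoopA (a ++ '"' :: (m ++ '"' :: z))
          = a.filter (fun c => !(c == ' ')) ++
            ('"' :: m ++ '"' :: z.filter (fun c => !(c == ' '))) := by
        rw [formatingLoopA_no_quote a ('"' :: (m ++ '"' :: z)) ha, formatingLoopA_span m z hz]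
      have htk : (a ++ '"' :: (m ++ '"' :: z)).take a.length = a := List.take_left ..
      have hmidlen : (a ++ '"' :: m).length + 1 = (a ++ '"' :: m ++ ['"']).length := by
        simp
        omega
      have hsplit : a ++ '"' :: (m ++ '"' :: z) = (a ++ '"' :: m ++ ['"']) ++ z := by simp
      have htk2 : (a ++ '"' :: (m ++ '"' :: z)).take ((a ++ '"' :: m).length + 1)
          = a ++ '"' :: m ++ ['"'] := by rw [hmidlen, hsplit, List.take_left]
      have hdp2 : (a ++ '"' :: (m ++ '"' :: z)).drop ((a ++ '"' :: m).length + 1) = z := by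
        rw [hmidlen, hsplit, List.drop_left]
      rw [hA, htk, htk2, hdp2, replace_space_eq_filter, replace_space_eq_filter]
      have hdp3 : (a ++ '"' :: m ++ ['"']).drop a.length = '"' :: m ++ ['"'] := by
        have : a ++ '"' :: m ++ ['"'] = a ++ ('"' :: m ++ ['"']) := by simp
        rw [this, List.drop_left]
      rw [hdp3]
      simp
    · have hrf : PySem.Chars.rfind (a ++ '"' :: b) ['"'] = (a.length : Int) :=
        rfind_singleton_last '"' a b hb
      rw [hrf]
      simp only [Int.toNat_natCast]
      have hA : formatingLoopA (a ++ '"' :: b)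
          = a.filter (fun c => !(c == ' ')) ++ ('"' :: b.filter (fun c => !(c == ' '))) := by
        rw [formatingLoopA_no_quote a ('"' :: b) ha, formatingLoopA_quote_noclose b hb]
      have htk : (a ++ '"' :: b).take a.length = a := List.take_left ..
      have hsplit : a ++ '"' :: b = (a ++ ['"']) ++ b := by simp
      have hlen1 : a.length + 1 = (a ++ ['"']).length := by simp
      have htk2 : (a ++ '"' :: b).take (a.length + 1) = a ++ ['"'] := by
        rw [hlen1, hsplit, List.take_left]
      have hdp2 : (a ++ '"' :: b).drop (a.length + 1) = b := by
        rw [hlen1, hsplit, List.drop_left]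
      have hdp3 : (a ++ ['"']).drop a.length = ['"'] := List.drop_left ..
      rw [hA, htk, htk2, hdp2, hdp3, replace_space_eq_filter, replace_space_eq_filter]
      simp
  · rw [if_pos (find_singleton_eq_neg_one '"' cs hq), replace_space_eq_filter]
    have := formatingLoopA_no_quote cs [] hq
    simpa [formatingLoopA] using this

-- ===== VERDICT (by name: the statement is the Claim_ definition above) =====
theorem formating_line_spec : Claim_equal_formating_line := by
  intro line _
  unfold Spec_formating_line formating_line formating_line_alt
  rw [core_eq line.toList]
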